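-- pv_equiv track=rewrite | github.com/leekkk2/transcendence-memory-server | scripts/task_rag_structured_ingest.py | collect_priority_fields
-- ===== SOURCE A (Python) =====
-- from typing import Any
--
-- SCALAR_KEYS_PRIORITY = [
--     'title', 'name', 'label', 'url', 'href', 'description', 'summary',
--     'content', 'text', 'value', 'type', 'id',
-- ]
--
-- def collect_priority_fields(obj: dict[str, Any]) -> list[tuple[str, Any]]:
--     seen = set()
--     fields: list[tuple[str, Any]] = []
--     for key in SCALAR_KEYS_PRIORITY:
--         if key in obj and not isinstance(obj[key], (dict, list)):
--             fields.append((key, obj[key]))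
--             seen.add(key)
--     for key, value in obj.items():
--         if key not in seen and not isinstance(value, (dict, list)):
--             fields.append((key, value))
--     return fields
-- ===== SOURCE B (Python) =====
-- SCALAR_KEYS_PRIORITY = [
--     'title', 'name', 'label', 'url', 'href', 'description', 'summary',
--     'content', 'text', 'value', 'type', 'id',
-- ]
--
-- def collect_priority_fields(obj):
--     rank = {k: i for i, k in enumerate(SCALAR_KEYS_PRIORITY)}
--     pri = [None] * len(SCALAR_KEYS_PRIORITY)
--     rest = []
--     for key, value in obj.items():
--         if isinstance(value, (dict, list)):
--             continue
--         i = rank.get(key)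
--         if i is None:
--             rest.append((key, value))
--         else:
--             pri[i] = (key, value)
--     return [p for p in pri if p is not None] + rest
-- ===== Notes on version B (the rewrite author's own statement) =====
-- stated objective: alternative
-- what changed: Replaces A's two passes (a scan over the priority list doing dict lookups plus a second pass over the dict with a 'seen' set) by a single pass over the dict that partitions items into a fixed bucket array indexed by a precomputed rank table and a rest list. Pre_ only rules out association lists with duplicate keys, which do not represent a Python dict (A's declared input type).
import Mathlib
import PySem

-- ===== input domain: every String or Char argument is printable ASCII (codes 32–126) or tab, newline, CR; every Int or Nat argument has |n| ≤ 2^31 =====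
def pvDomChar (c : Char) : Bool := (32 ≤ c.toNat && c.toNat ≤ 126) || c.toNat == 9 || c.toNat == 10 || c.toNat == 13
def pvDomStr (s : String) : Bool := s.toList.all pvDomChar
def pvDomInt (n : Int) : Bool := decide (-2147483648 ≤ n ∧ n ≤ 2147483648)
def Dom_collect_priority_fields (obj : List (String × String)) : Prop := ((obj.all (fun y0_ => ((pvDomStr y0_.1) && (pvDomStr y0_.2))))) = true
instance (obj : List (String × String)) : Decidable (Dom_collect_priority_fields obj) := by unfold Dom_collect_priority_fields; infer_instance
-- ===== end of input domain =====

-- B replaces A's two passes (a priority-list scan with dict lookups plus a second pass over the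
-- dict with a seen set) by one pass over the dict that partitions items into a rank-indexed
-- bucket array and a rest list (objective: alternative, same cost).

-- shared module-level constant SCALAR_KEYS_PRIORITY
def SCALAR_KEYS_PRIORITY : List String :=
  ["title", "name", "label", "url", "href", "description", "summary",
   "content", "text", "value", "type", "id"]

-- ===== PORT A =====
-- values are typed String here, so Python's `isinstance(v, (dict, list))` test is always False and is dropped
def collect_priority_fields (obj : List (String × String)) : List (String × String) :=
  let st :=
    SCALAR_KEYS_PRIORITY.foldl
      (fun (st : PySem.Set String × List (String × String)) key =>
        match PySem.Dict.get? (PySem.Dict.mk obj) key with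
        | some v => (PySem.Set.add st.1 key, st.2 ++ [(key, v)])
        | none => st)
      (PySem.Set.empty, [])
  obj.foldl
    (fun fields kv =>
      if !(PySem.Set.contains st.1 kv.1) then fields ++ [kv] else fields)
    st.2

-- ===== PORT B =====
def collect_priority_fields_alt (obj : List (String × String)) : List (String × String) :=
  let rank : PySem.Dict String Int :=
    PySem.Dict.ofList ((PySem.List.enumerate SCALAR_KEYS_PRIORITY).map (fun p => (p.2, p.1)))
  let st :=
    obj.foldl
      (fun (st : List (Option (String × String)) × List (String × String)) kv =>
        match PySem.Dict.get? rank kv.1 with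
        | none => (st.1, st.2 ++ [kv])
        | some i => (PySem.List.pySetD st.1 i (some kv), st.2))
      (List.replicate SCALAR_KEYS_PRIORITY.length none, [])
  st.1.filterMap id ++ st.2

-- ===== PRECONDITION & SPEC =====
-- Pre_ requires distinct keys: an association list with duplicate keys does not represent a
-- Python dict (A's declared parameter type), so first-match/last-write behaviour there is accidental.
def Pre_collect_priority_fields (obj : List (String × String)) : Prop :=
  (obj.map Prod.fst).Nodup

instance (obj : List (String × String)) : Decidable (Pre_collect_priority_fields obj) := by
  unfold Pre_collect_priority_fields; infer_instance

def pvWitness_collect_priority_fields : (List (String × String)) :=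
  [("name", "n"), ("x", "1"), ("id", "7")]

def Spec_collect_priority_fields (obj : List (String × String)) (out : List (String × String)) : Prop :=
  out = collect_priority_fields_alt obj

instance (obj : List (String × String)) (out : List (String × String)) :
    Decidable (Spec_collect_priority_fields obj out) := by
  unfold Spec_collect_priority_fields; infer_instance

-- ===== CLAIM (what is proved, stated in full; the proofs are below) =====
def Claim_equal_collect_priority_fields : Prop :=
  ∀ (obj : List (String × String)), Dom_collect_priority_fields obj →
    Pre_collect_priority_fields obj →
    Spec_collect_priority_fields obj (collect_priority_fields obj)

-- ===== LEMMAS AND PROOFS =====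


theorem pvRank_get? (k : String) :
    PySem.Dict.get? (PySem.Dict.ofList ((PySem.List.enumerate SCALAR_KEYS_PRIORITY).map (fun p => (p.2, p.1)))) k
    = Option.map (fun n : Nat => (n : Int)) (PySem.List.index? SCALAR_KEYS_PRIORITY k) := by
  by_cases h1 : k = "title"; · subst h1; decide
  by_cases h2 : k = "name"; · subst h2; decide
  by_cases h3 : k = "label"; · subst h3; decide
  by_cases h4 : k = "url"; · subst h4; decide
  by_cases h5 : k = "href"; · subst h5; decide
  by_cases h6 : k = "description"; · subst h6; decide
  by_cases h7 : k = "summary"; · subst h7; decide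
  by_cases h8 : k = "content"; · subst h8; decide
  by_cases h9 : k = "text"; · subst h9; decide
  by_cases h10 : k = "value"; · subst h10; decide
  by_cases h11 : k = "type"; · subst h11; decide
  by_cases h12 : k = "id"; · subst h12; decide
  have hnm : k ∉ SCALAR_KEYS_PRIORITY := by simp [SCALAR_KEYS_PRIORITY, h1, h2, h3, h4, h5, h6, h7, h8, h9, h10, h11, h12]
  have hrhs : PySem.List.index? SCALAR_KEYS_PRIORITY k = none := (PySem.List.index?_eq_none_iff SCALAR_KEYS_PRIORITY k).mpr hnm
  rw [hrhs]
  have hr : PySem.Dict.ofList ((PySem.List.enumerate SCALAR_KEYS_PRIORITY).map (fun p => (p.2, p.1)))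
      = PySem.Dict.mk [("title",(0:Int)),("name",1),("label",2),("url",3),("href",4),
        ("description",5),("summary",6),("content",7),("text",8),("value",9),("type",10),("id",11)] := by
    decide
  rw [hr]
  simp [Ne.symm h1, Ne.symm h2, Ne.symm h3, Ne.symm h4, Ne.symm h5,
    Ne.symm h6, Ne.symm h7, Ne.symm h8, Ne.symm h9, Ne.symm h10, Ne.symm h11, Ne.symm h12,
    PySem.Dict.get?]

theorem pvA_phase1 (obj : List (String × String)) (ks : List String)
    (s : PySem.Set String) (acc : List (String × String)) :
    ks.foldl
      (fun (st : PySem.Set String × List (String × String)) key =>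
        match PySem.Dict.get? (PySem.Dict.mk obj) key with
        | some v => (PySem.Set.add st.1 key, st.2 ++ [(key, v)])
        | none => st)
      (s, acc)
    = (ks.foldl (fun s k => if (PySem.Dict.get? (PySem.Dict.mk obj) k).isSome
                            then PySem.Set.add s k else s) s,
       acc ++ ks.filterMap (fun k => (PySem.Dict.get? (PySem.Dict.mk obj) k).map (fun v => (k, v)))) := by
  induction ks generalizing s acc with
  | nil => simp
  | cons k ks ih =>
    cases h : PySem.Dict.get? (PySem.Dict.mk obj) k with
    | none => simp [List.foldl_cons, h, ih]
    | some v => simp [List.foldl_cons, h, ih]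

theorem pvA_seen_mem (obj : List (String × String)) (ks : List String)
    (s : PySem.Set String) (x : String) :
    (x ∈ ks.foldl (fun s k => if (PySem.Dict.get? (PySem.Dict.mk obj) k).isSome
                              then PySem.Set.add s k else s) s)
    ↔ x ∈ s ∨ (x ∈ ks ∧ (PySem.Dict.get? (PySem.Dict.mk obj) x).isSome) := by
  induction ks generalizing s with
  | nil => simp
  | cons k ks ih =>
    by_cases h : (PySem.Dict.get? (PySem.Dict.mk obj) k).isSome
    · simp only [List.foldl_cons, if_pos h, ih, PySem.Set.mem_add, List.mem_cons]
      constructor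
      · rintro (⟨hs | rfl⟩ | ⟨hk, hg⟩)
        · exact Or.inl hs
        · exact Or.inr ⟨Or.inl rfl, h⟩
        · exact Or.inr ⟨Or.inr hk, hg⟩
      · rintro (hs | ⟨(rfl | hk), hg⟩)
        · exact Or.inl (Or.inl hs)
        · exact Or.inl (Or.inr rfl)
        · exact Or.inr ⟨hk, hg⟩
    · simp only [List.foldl_cons, if_neg h, ih, List.mem_cons]
      constructor
      · rintro (hs | ⟨hk, hg⟩)
        · exact Or.inl hs
        · exact Or.inr ⟨Or.inr hk, hg⟩
      · rintro (hs | ⟨(rfl | hk), hg⟩)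
        · exact Or.inl hs
        · exact absurd hg h
        · exact Or.inr ⟨hk, hg⟩

theorem pvGet?_of_mem (obj : List (String × String)) (kv : String × String)
    (h : kv ∈ obj) : (PySem.Dict.get? (PySem.Dict.mk obj) kv.1).isSome := by
  induction obj with
  | nil => simp at h
  | cons p rest ih =>
    rw [PySem.Dict.get?_mk_cons]
    rcases List.mem_cons.mp h with rfl | hm
    · simp
    · by_cases he : p.1 == kv.1 <;> simp [he, ih hm]

theorem pvGet?_none_of_not_mem (obj : List (String × String)) (k : String)
    (h : k ∉ obj.map Prod.fst) : PySem.Dict.get? (PySem.Dict.mk obj) k = none := by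
  induction obj with
  | nil => rfl
  | cons p rest ih =>
    simp only [List.map_cons, List.mem_cons, not_or] at h
    rw [PySem.Dict.get?_mk_cons]
    have : ¬ (p.1 = k) := fun hh => h.1 (by simp [hh])
    simp [this, ih h.2]

theorem pvSet_map_range (n : Nat) (β : Nat → Option (String × String)) (i : Nat) (x : Option (String × String)) :
    ((List.range n).map β).set i x = (List.range n).map (fun j => if j = i then x else β j) := by
  apply List.ext_getElem
  · simp
  · intro j h1 h2
    simp only [List.getElem_set, List.getElem_map, List.getElem_range]
    have h' : ∀ (h : ¬ i = j), ¬ j = i := fun h hh => h hh.symm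
    by_cases h : i = j
    · subst h; simp
    · simp [h, h' h]

theorem pvB_inv (obj : List (String × String)) (hnd : (obj.map Prod.fst).Nodup)
    (β : Nat → Option (String × String)) (os : List (String × String)) :
    obj.foldl
      (fun (st : List (Option (String × String)) × List (String × String)) kv =>
        match PySem.Dict.get? (PySem.Dict.ofList ((PySem.List.enumerate SCALAR_KEYS_PRIORITY).map (fun p => (p.2, p.1)))) kv.1 with
        | none => (st.1, st.2 ++ [kv])
        | some i => (PySem.List.pySetD st.1 i (some kv), st.2))
      ((List.range SCALAR_KEYS_PRIORITY.length).map β, os)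
    = ((List.range SCALAR_KEYS_PRIORITY.length).map (fun j =>
        match PySem.Dict.get? (PySem.Dict.mk obj) (SCALAR_KEYS_PRIORITY[j]!) with
        | some v => some ((SCALAR_KEYS_PRIORITY[j]!), v)
        | none => β j),
       os ++ obj.filter (fun kv => !(SCALAR_KEYS_PRIORITY.contains kv.1))) := by
  induction obj generalizing β os with
  | nil => simp [PySem.Dict.get?]
  | cons kv rest ih =>
    simp only [List.map_cons, List.nodup_cons] at hnd
    rw [List.foldl_cons]
    cases hix : PySem.Dict.get? (PySem.Dict.ofList ((PySem.List.enumerate SCALAR_KEYS_PRIORITY).map (fun p => (p.2, p.1)))) kv.1 with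
    | none =>
      have hnm : kv.1 ∉ SCALAR_KEYS_PRIORITY := by
        have h0 := pvRank_get? kv.1
        rw [hix] at h0
        intro hm
        rcases (PySem.List.index?_isSome_iff SCALAR_KEYS_PRIORITY kv.1).mpr hm with _
        cases h1 : PySem.List.index? SCALAR_KEYS_PRIORITY kv.1 with
        | none => exact absurd ((PySem.List.index?_eq_none_iff SCALAR_KEYS_PRIORITY kv.1).mp h1) (by simp [hm])
        | some n => rw [h1] at h0; simp at h0
      rw [ih hnd.2 β (os ++ [kv])]
      simp only [Prod.mk.injEq]
      constructor
      · apply List.map_congr_left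
        intro j hj
        simp only [List.mem_range] at hj
        have hjP : SCALAR_KEYS_PRIORITY[j]! ∈ SCALAR_KEYS_PRIORITY := by
          rw [getElem!_pos SCALAR_KEYS_PRIORITY j hj]; exact List.getElem_mem hj
        have hne : ¬ (kv.1 = SCALAR_KEYS_PRIORITY[j]!) := fun h => hnm (h ▸ hjP)
        rw [PySem.Dict.get?_mk_cons]
        simp only [beq_iff_eq, if_neg hne]
      · have hc : (!SCALAR_KEYS_PRIORITY.contains kv.1) = true := by simp [hnm]
        simp [hnm]
    | some i =>
      have h0 := pvRank_get? kv.1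
      rw [hix] at h0
      cases h1 : PySem.List.index? SCALAR_KEYS_PRIORITY kv.1 with
      | none =>
        rw [h1] at h0
        simp only [Option.map_none] at h0
        exact absurd h0 (by simp)
      | some n =>
      rw [h1] at h0
      simp only [Option.map_some, Option.some.injEq] at h0
      obtain ⟨hn, hPn, _⟩ := PySem.List.getElem_of_index?_eq_some h1
      have hset : PySem.List.pySetD ((List.range SCALAR_KEYS_PRIORITY.length).map β) i (some kv)
          = (List.range SCALAR_KEYS_PRIORITY.length).map (fun j => if j = n then some kv else β j) := by
        rw [h0, PySem.List.pySetD_natCast, pvSet_map_range]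
      simp only [hset]
      rw [ih hnd.2 _ os]
      simp only [Prod.mk.injEq]
      constructor
      · apply List.map_congr_left
        intro j hj
        simp only [List.mem_range] at hj
        by_cases hje : j = n
        · subst hje
          have hh1 : SCALAR_KEYS_PRIORITY[j]! = kv.1 := by
            rw [getElem!_pos SCALAR_KEYS_PRIORITY j hj]; exact hPn
          rw [hh1, PySem.Dict.get?_mk_cons]
          have hrest : PySem.Dict.get? (PySem.Dict.mk rest) kv.1 = none :=
            pvGet?_none_of_not_mem rest kv.1 hnd.1
          simp [hrest]
        · have hh1 : SCALAR_KEYS_PRIORITY[j]! ≠ kv.1 := by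
            intro hc
            apply hje
            have hPnod : SCALAR_KEYS_PRIORITY.Nodup := by decide
            have heq : SCALAR_KEYS_PRIORITY[j]! = SCALAR_KEYS_PRIORITY[n]! := by
              rw [hc, getElem!_pos SCALAR_KEYS_PRIORITY n hn]; exact hPn.symm
            rw [getElem!_pos SCALAR_KEYS_PRIORITY j hj, getElem!_pos SCALAR_KEYS_PRIORITY n hn] at heq
            exact (List.Nodup.getElem_inj_iff hPnod).mp heq
          rw [PySem.Dict.get?_mk_cons]
          have hne : ¬ (kv.1 = SCALAR_KEYS_PRIORITY[j]!) := fun h => hh1 h.symm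
          simp only [beq_iff_eq, if_neg hne, if_neg hje]
      · have hmem : kv.1 ∈ SCALAR_KEYS_PRIORITY := by
          rw [← hPn]; exact List.getElem_mem hn
        have hc : (!SCALAR_KEYS_PRIORITY.contains kv.1) = false := by simp [hmem]
        simp [hmem]

theorem pvA_closed (obj : List (String × String)) :
    collect_priority_fields obj = SCALAR_KEYS_PRIORITY.filterMap (fun k => (PySem.Dict.get? (PySem.Dict.mk obj) k).map (fun v => (k, v)))
             ++ obj.filter (fun kv => !(SCALAR_KEYS_PRIORITY.contains kv.1)) := by
  unfold collect_priority_fields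
  rw [pvA_phase1, PySem.List.foldl_append_if_eq_filter]
  simp only [List.nil_append]
  congr 1
  apply List.filter_congr
  intro kv hkv
  have hg : (PySem.Dict.get? (PySem.Dict.mk obj) kv.1).isSome := pvGet?_of_mem obj kv hkv
  congr 1
  rw [Bool.eq_iff_iff]
  simp only [List.contains_iff_mem]
  rw [show ((List.foldl (fun s k => if (PySem.Dict.get? (PySem.Dict.mk obj) k).isSome = true then PySem.Set.add s k else s) PySem.Set.empty SCALAR_KEYS_PRIORITY).contains kv.1 = true) ↔ kv.1 ∈ (List.foldl (fun s k => if (PySem.Dict.get? (PySem.Dict.mk obj) k).isSome = true then PySem.Set.add s k else s) PySem.Set.empty SCALAR_KEYS_PRIORITY) from PySem.Set.contains_iff _ _]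
  rw [pvA_seen_mem]
  simp [PySem.Set.empty, hg]

theorem pvB_closed (obj : List (String × String)) (hnd : (obj.map Prod.fst).Nodup) :
    collect_priority_fields_alt obj = SCALAR_KEYS_PRIORITY.filterMap (fun k => (PySem.Dict.get? (PySem.Dict.mk obj) k).map (fun v => (k, v)))
             ++ obj.filter (fun kv => !(SCALAR_KEYS_PRIORITY.contains kv.1)) := by
  unfold collect_priority_fields_alt
  dsimp only
  have hrep : (List.replicate SCALAR_KEYS_PRIORITY.length (none : Option (String × String)))
      = (List.range SCALAR_KEYS_PRIORITY.length).map (fun _ => none) := by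
    simp
  rw [hrep, pvB_inv obj hnd (fun _ => none) []]
  simp only [List.nil_append]
  congr 1
  have hmap : (List.range SCALAR_KEYS_PRIORITY.length).map (fun j : Nat => SCALAR_KEYS_PRIORITY[j]!) = SCALAR_KEYS_PRIORITY := by decide
  conv_rhs => rw [← hmap]
  rw [List.filterMap_map, List.filterMap_map]
  have hfun : (id ∘ (fun j => match PySem.Dict.get? (PySem.Dict.mk obj) (SCALAR_KEYS_PRIORITY[j]!) with
        | some v => some ((SCALAR_KEYS_PRIORITY[j]!), v)
        | none => (fun _ => (none : Option (String × String))) j))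
      = ((fun k => (PySem.Dict.get? (PySem.Dict.mk obj) k).map (fun v => (k, v))) ∘ (fun j : Nat => SCALAR_KEYS_PRIORITY[j]!)) := by
    funext j
    simp only [Function.comp, id]
    cases PySem.Dict.get? (PySem.Dict.mk obj) (SCALAR_KEYS_PRIORITY[j]!) <;> rfl
  rw [hfun]

-- ===== VERDICT (by name: the statement is the Claim_ definition above) =====
theorem collect_priority_fields_spec : Claim_equal_collect_priority_fields := by
  intro obj _ hnd
  unfold Spec_collect_priority_fields
  rw [pvA_closed obj, pvB_closed obj hnd]
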